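-- pv_equiv track=rewrite | github.com/fieryhenry/BCGM-Python | src/BCGM_Python/libnative/find_order.py | server_lists_lengths
-- ===== SOURCE A (Python) =====
-- import math
--
-- def get_length(length):
--     total_loops = math.ceil(length / 7)
--     skip = (total_loops*7) - length
--     return {"length" : total_loops, "skip" : skip}
--
-- def server_lists_lengths(names):
--     version = ""
--     counter = 0
--     for name in names:
--         if "Server" in name and ".list" in name:
--             data = name.split("_")
--             if len(data) == 4:
--                 if not version:
--                     version = name.split("_")[3][:2]
--                 if version and version == name.split("_")[3][:2]:
--                     counter += 1
--             else:
--                 counter += 1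
--
--     return get_length(counter)
-- ===== SOURCE B (Python) =====
-- import math
--
-- def get_length(length):
--     total_loops = math.ceil(length / 7)
--     skip = (total_loops*7) - length
--     return {"length" : total_loops, "skip" : skip}
--
-- def server_lists_lengths(names):
--     # Group qualifying 4-field names by their version prefix in one dict pass,
--     # then a single lookup at the first nonempty prefix replaces A's running comparison.
--     base = 0
--     groups = {}
--     for name in names:
--         if "Server" not in name or ".list" not in name:
--             continue
--         parts = name.split("_")
--         if len(parts) != 4:
--             base += 1
--         else:
--             p = parts[3][:2]
--             groups[p] = groups.get(p, 0) + 1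
--     version = next((p for p in groups if p), "")
--     return get_length(base + (groups[version] if version else 0))
-- ===== Notes on version B (the rewrite author's own statement) =====
-- stated objective: alternative
-- what changed: A's single stateful loop carrying a running version string and a conditionally-incremented counter is replaced by a grouping pass that builds a dict of counts per version prefix (plus a plain count of non-4-field names) with no version comparison at all, finished by one dict lookup at the first nonempty prefix key.
import Mathlib
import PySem

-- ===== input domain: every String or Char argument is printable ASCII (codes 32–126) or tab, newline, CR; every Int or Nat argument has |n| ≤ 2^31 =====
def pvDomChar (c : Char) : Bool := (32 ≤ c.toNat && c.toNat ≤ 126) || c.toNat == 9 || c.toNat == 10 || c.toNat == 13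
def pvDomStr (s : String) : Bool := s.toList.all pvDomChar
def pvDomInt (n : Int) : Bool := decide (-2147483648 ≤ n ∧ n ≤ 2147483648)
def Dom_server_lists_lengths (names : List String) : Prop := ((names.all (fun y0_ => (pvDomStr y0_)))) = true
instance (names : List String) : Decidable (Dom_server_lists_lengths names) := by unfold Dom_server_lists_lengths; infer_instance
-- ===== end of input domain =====

-- B replaces A's single stateful loop (running version + conditional count) by a grouping pass:
-- a dict of counts per version prefix plus a count of non-4-field names, finished by one lookup
-- at the first nonempty prefix; objective: alternative.

-- ===== PORT A =====
-- shared module helper get_length; math.ceil(length/7) is ceiling division, exact for the int arguments this module passes it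
def get_length (length : Int) : List (String × Int) :=
  let total_loops := -(PySem.Int.floordiv (-length) 7)
  let skip := total_loops * 7 - length
  [("length", total_loops), ("skip", skip)]

-- name.split("_")  (sep "_" is nonempty, so split? always returns some)
def pvSplitA (name : String) : List String := (PySem.Str.split? name "_").getD []

-- name.split("_")[3][:2]; only evaluated under the len(data) == 4 guard, where index 3 is in range
def pvPrefA (name : String) : String :=
  PySem.Str.slice ((PySem.List.pyGet? (pvSplitA name) 3).getD "") none (some 2)

def server_lists_lengths (names : List String) : List (String × Int) :=
  let st := names.foldl (fun (st : String × Int) name =>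
      if PySem.Str.isIn "Server" name && PySem.Str.isIn ".list" name then
        let data := pvSplitA name
        if data.length == 4 then
          let version := if st.1 == "" then pvPrefA name else st.1
          if version != "" && version == pvPrefA name then (version, st.2 + 1)
          else (version, st.2)
        else (st.1, st.2 + 1)
      else st) ("", 0)
  get_length st.2

-- ===== PORT B =====
-- d[3][:2]; only evaluated under a len(d) == 4 guard, where index 3 is in range
def pvPrefB (d : List String) : String :=
  PySem.Str.slice ((PySem.List.pyGet? d 3).getD "") none (some 2)

def server_lists_lengths_alt (names : List String) : List (String × Int) :=
  let st := names.foldl (fun (st : Int × PySem.Dict String Int) name =>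
      if !(PySem.Str.isIn "Server" name) || !(PySem.Str.isIn ".list" name) then st
      else
        let parts := pvSplitA name
        if parts.length != 4 then (st.1 + 1, st.2)
        else
          let p := pvPrefB parts
          (st.1, st.2.insert p (st.2.getD p 0 + 1))) (0, PySem.Dict.empty)
  let version := ((st.2.keys.filter (fun p => p != "")).head?).getD ""
  get_length (st.1 + (if version != "" then st.2.getD version 0 else 0))

-- ===== PRECONDITION & SPEC =====
def Spec_server_lists_lengths (names : List String) (out : List (String × Int)) : Prop := out = server_lists_lengths_alt names
instance (names : List String) (out : List (String × Int)) : Decidable (Spec_server_lists_lengths names out) := by unfold Spec_server_lists_lengths; infer_instance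

-- ===== CLAIM (what is proved, stated in full; the proofs are below) =====
def Claim_equal_server_lists_lengths : Prop := ∀ (names : List String), Dom_server_lists_lengths names → Spec_server_lists_lengths names (server_lists_lengths names)

-- ===== LEMMAS AND PROOFS =====

def pvQual (n : String) : Bool := PySem.Str.isIn "Server" n && PySem.Str.isIn ".list" n

-- A's per-element step, after the qualification filter and the split are factored out of the loop
def pvStepA (st : String × Int) (d : List String) : String × Int :=
  if d.length == 4 then
    let version := if st.1 == "" then pvPrefB d else st.1
    if version != "" && version == pvPrefB d then (version, st.2 + 1)
    else (version, st.2)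
  else (st.1, st.2 + 1)

-- B's per-element step, likewise factored
def pvStepB (st : Int × PySem.Dict String Int) (d : List String) : Int × PySem.Dict String Int :=
  if d.length != 4 then (st.1 + 1, st.2)
  else (st.1, st.2.insert (pvPrefB d) (st.2.getD (pvPrefB d) 0 + 1))

def pvFirstPref (ds : List (List String)) : String :=
  (((ds.filter (fun d => d.length == 4 && pvPrefB d != "")).head?).map pvPrefB).getD ""

def pvFinalV (v : String) (ds : List (List String)) : String :=
  if v = "" then pvFirstPref ds else v

lemma pvMain : ∀ (ds : List (List String)) (v : String) (c : Int),
    ds.foldl pvStepA (v, c) =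
      (pvFinalV v ds,
       c + (ds.countP (fun d => d.length != 4 || (pvFinalV v ds != "" && pvPrefB d == pvFinalV v ds)) : Int)) := by
  intro ds
  induction ds with
  | nil =>
    intro v c
    by_cases hv : v = "" <;> simp [pvFinalV, pvFirstPref, hv]
  | cons d ds ih =>
    intro v c
    by_cases h4 : d.length = 4
    · by_cases hv : v = ""
      · by_cases hp : pvPrefB d = ""
        · have hstep : pvStepA (v, c) d = ("", c) := by
            simp [pvStepA, h4, hv, hp]
          have hfin : pvFinalV v (d :: ds) = pvFinalV "" ds := by
            simp [pvFinalV, pvFirstPref, hv, h4, hp]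
          rw [List.foldl_cons, hstep, ih "" c, hfin]
          congr 1
          rw [List.countP_cons]
          have hcond : (d.length != 4 || (pvFinalV "" ds != "" && pvPrefB d == pvFinalV "" ds)) = false := by
            simp [h4, hp]
          rw [hcond]
          simp
        · have hstep : pvStepA (v, c) d = (pvPrefB d, c + 1) := by
            simp [pvStepA, h4, hv, hp]
          have hfilter : (d.length == 4 && pvPrefB d != "") = true := by simp [h4, hp]
          have hfin : pvFinalV v (d :: ds) = pvPrefB d := by
            simp [pvFinalV, pvFirstPref, hv, hfilter]
          have hfin2 : pvFinalV (pvPrefB d) ds = pvPrefB d := by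
            simp [pvFinalV, hp]
          rw [List.foldl_cons, hstep, ih (pvPrefB d) (c + 1), hfin, hfin2]
          congr 1
          rw [List.countP_cons]
          have hcond : (d.length != 4 || (pvPrefB d != "" && pvPrefB d == pvPrefB d)) = true := by
            simp [hp]
          rw [hcond]
          simp; ring
      · have hfin : pvFinalV v (d :: ds) = v := by simp [pvFinalV, hv]
        have hfin2 : pvFinalV v ds = v := by simp [pvFinalV, hv]
        by_cases hc : pvPrefB d = v
        · have hstep : pvStepA (v, c) d = (v, c + 1) := by
            simp [pvStepA, h4, hv, hc]
          rw [List.foldl_cons, hstep, ih v (c + 1), hfin, hfin2]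
          congr 1
          rw [List.countP_cons]
          have hcond : (d.length != 4 || (v != "" && pvPrefB d == v)) = true := by
            simp [hv, hc]
          rw [hcond]
          simp; ring
        · have hstep : pvStepA (v, c) d = (v, c) := by
            simp [pvStepA, h4, hv]
            exact fun h => absurd h.symm hc
          rw [List.foldl_cons, hstep, ih v c, hfin, hfin2]
          congr 1
          rw [List.countP_cons]
          have hcond : (d.length != 4 || (v != "" && pvPrefB d == v)) = false := by
            simp [h4, hc]
          rw [hcond]
          simp
    · have hstep : pvStepA (v, c) d = (v, c + 1) := by
        simp [pvStepA, h4]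
      have hfilter : (d.length == 4 && pvPrefB d != "") = false := by simp [h4]
      have hfin : pvFinalV v (d :: ds) = pvFinalV v ds := by
        by_cases hv : v = "" <;>
          simp [pvFinalV, pvFirstPref, hv, hfilter]
      rw [List.foldl_cons, hstep, ih v (c + 1), hfin]
      congr 1
      rw [List.countP_cons]
      have hcond : (d.length != 4 || (pvFinalV v ds != "" && pvPrefB d == pvFinalV v ds)) = true := by
        simp [h4]
      rw [hcond]
      simp; ring

-- A's loop over names is pvStepA over the filtered, split list
lemma pvFoldA (names : List String) :
    names.foldl (fun (st : String × Int) name =>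
      if PySem.Str.isIn "Server" name && PySem.Str.isIn ".list" name then
        let data := pvSplitA name
        if data.length == 4 then
          let version := if st.1 == "" then pvPrefA name else st.1
          if version != "" && version == pvPrefA name then (version, st.2 + 1)
          else (version, st.2)
        else (st.1, st.2 + 1)
      else st) ("", 0) =
    ((names.filter pvQual).map pvSplitA).foldl pvStepA ("", 0) := by
  rw [List.foldl_map, List.foldl_filter]
  apply List.foldl_ext
  intro st n _
  simp only [pvQual, pvStepA, pvPrefA, pvPrefB]

-- B's loop over names is pvStepB over the same filtered, split list
lemma pvFoldB (names : List String) :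
    names.foldl (fun (st : Int × PySem.Dict String Int) name =>
      if !(PySem.Str.isIn "Server" name) || !(PySem.Str.isIn ".list" name) then st
      else
        let parts := pvSplitA name
        if parts.length != 4 then (st.1 + 1, st.2)
        else
          let p := pvPrefB parts
          (st.1, st.2.insert p (st.2.getD p 0 + 1))) (0, PySem.Dict.empty) =
    ((names.filter pvQual).map pvSplitA).foldl pvStepB (0, PySem.Dict.empty) := by
  rw [List.foldl_map, List.foldl_filter]
  apply List.foldl_ext
  intro st n _
  by_cases h1 : PySem.Str.isIn "Server" n = true <;>
    by_cases h2 : PySem.Str.isIn ".list" n = true <;>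
      [skip; skip; skip; skip] <;>
    simp [PySem.Str.isIn] at h1 h2 <;>
      simp [pvQual, PySem.Str.isIn, h1, h2, pvStepB]

-- B's fold splits into the base count and a prefix-frequency dict
lemma pvBSplit : ∀ (ds : List (List String)) (b : Int) (g : PySem.Dict String Int),
    ds.foldl pvStepB (b, g) =
      (b + (ds.countP (fun d => d.length != 4) : Int),
       ((ds.filter (fun d => d.length == 4)).map pvPrefB).foldl
         (fun g p => g.insert p (g.getD p 0 + 1)) g) := by
  intro ds
  induction ds with
  | nil => intro b g; simp
  | cons d ds ih =>
    intro b g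
    by_cases h4 : d.length = 4
    · have hstep : pvStepB (b, g) d = (b, g.insert (pvPrefB d) (g.getD (pvPrefB d) 0 + 1)) := by
        simp [pvStepB, h4]
      rw [List.foldl_cons, hstep, ih]
      simp [h4]
    · have hstep : pvStepB (b, g) d = (b + 1, g) := by
        simp [pvStepB, h4]
      rw [List.foldl_cons, hstep, ih]
      simp [h4]
      ring

-- the first nonempty element survives deduplication
lemma pvHeadOfList : ∀ (ps : List String),
    ((PySem.Set.ofList ps).filter (fun p => p != "")).head? =
      (ps.filter (fun p => p != "")).head? := by
  intro ps
  induction ps with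
  | nil => simp [PySem.Set.ofList_nil]
  | cons p ps ih =>
    rw [PySem.Set.ofList_cons]
    by_cases hp : p = ""
    · subst hp
      simp only [List.filter_cons]
      have : (PySem.Set.discard (PySem.Set.ofList ps) "").filter (fun p => p != "") =
          (PySem.Set.ofList ps).filter (fun p => p != "") := by
        simp only [PySem.Set.discard, List.filter_filter]
        apply List.filter_congr
        intro x _
        by_cases hx : x = "" <;> simp [hx]
      simp [this, ih]
    · simp [hp]

-- A's mixed count splits into the base count plus the frequency of V among the prefixes
lemma pvCountSplit (V : String) : ∀ (ds : List (List String)),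
    ds.countP (fun d => d.length != 4 || (V != "" && pvPrefB d == V)) =
      ds.countP (fun d => d.length != 4) +
        (if V = "" then 0 else ((ds.filter (fun d => d.length == 4)).map pvPrefB).count V) := by
  intro ds
  induction ds with
  | nil => simp
  | cons d ds ih =>
    by_cases h4 : d.length = 4
    · by_cases hV : V = ""
      · simp [h4, hV]
      · by_cases hm : pvPrefB d = V
        · simp [h4, hV, hm, ih]
          omega
        · have : (pvPrefB d == V) = false := by simp [hm]
          simp [h4, hV, this, ih, hm]
    · by_cases hV : V = ""
      · simp [h4, hV]
      · simp [h4, hV, ih]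
        omega

-- pvFirstPref is the first nonempty prefix
lemma pvFirstPref_eq (ds : List (List String)) :
    pvFirstPref ds =
      ((((ds.filter (fun d => d.length == 4)).map pvPrefB).filter (fun p => p != "")).head?).getD "" := by
  unfold pvFirstPref
  rw [List.filter_map, List.head?_map, List.filter_filter]
  have h : List.filter (fun a => ((fun p => p != "") ∘ pvPrefB) a && a.length == 4) ds =
      List.filter (fun d => d.length == 4 && pvPrefB d != "") ds :=
    List.filter_congr (fun x _ => by simp [Function.comp, Bool.and_comm])
  rw [h]

-- ===== VERDICT (by name: the statement is the Claim_ definition above) =====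
theorem server_lists_lengths_spec : Claim_equal_server_lists_lengths := by
  intro names _
  unfold Spec_server_lists_lengths
  show server_lists_lengths names = server_lists_lengths_alt names
  unfold server_lists_lengths server_lists_lengths_alt
  simp only []
  rw [pvFoldA, pvFoldB, pvMain, pvBSplit]
  simp only []
  set ds := (names.filter pvQual).map pvSplitA with hds
  set ps := (ds.filter (fun d => d.length == 4)).map pvPrefB with hps
  have hV : pvFinalV "" ds = ((ps.filter (fun p => p != "")).head?).getD "" := by
    simp [pvFinalV, pvFirstPref_eq, hps]
  congr 1
  rw [PySem.Dict.foldl_insert_getD_add_one_eq_counter, PySem.Dict.keys_counter, pvHeadOfList,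
    ← hV, pvCountSplit (pvFinalV "" ds) ds, ← hps]
  by_cases hE : pvFinalV "" ds = ""
  · simp [hE]
  · simp [hE, PySem.Dict.getD_counter]
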